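-- pv_equiv track=rewrite | github.com/vitorandos/paradigmas | Python/metroParis.py | trouver_chemin2
-- ===== SOURCE A (Python) =====
-- def trouver_chemin2(graph, vertex, destination, all_stations, path = []):
--     stack = []
--     stack.append(vertex)
--     while len(stack) > 0:
--         vertex = stack.pop()
--         if vertex in all_stations:
--             all_stations.remove(vertex)
--             path = path + [vertex]
--             if vertex == destination:
--                 return path
--             else:
--                 for station in graph[vertex]:
--                     stack.append(station)
--     return None
-- ===== SOURCE B (Python) =====
-- def trouver_chemin2(graph, vertex, destination, all_stations, path=[]):
--     # Recursive DFS over a sibling list instead of A's explicit stack.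
--     # Like A, it removes visited stations from all_stations in place.
--     def dfs(targets, path):
--         if not targets:
--             return (False, path)
--         v, rest = targets[0], targets[1:]
--         if v not in all_stations:
--             return dfs(rest, path)
--         all_stations.remove(v)
--         path = path + [v]
--         if v == destination:
--             return (True, path)
--         found, path = dfs(list(reversed(graph[v])), path)
--         if found:
--             return (True, path)
--         return dfs(rest, path)
--     found, path = dfs([vertex], path)
--     return path if found else None
-- ===== Notes on version B (the rewrite author's own statement) =====
-- stated objective: alternative
-- what changed: Replaced the explicit-stack while loop with a recursive DFS helper dfs(targets, path) that recurses into a vertex's reversed neighbour list before its siblings, threading the accumulated path through the recursion.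
-- outside the precondition, e.g. on trouver_chemin2({'a': ['x']}, 'a', 'd', ['x'], []): A returns None, B returns None
import Mathlib
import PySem

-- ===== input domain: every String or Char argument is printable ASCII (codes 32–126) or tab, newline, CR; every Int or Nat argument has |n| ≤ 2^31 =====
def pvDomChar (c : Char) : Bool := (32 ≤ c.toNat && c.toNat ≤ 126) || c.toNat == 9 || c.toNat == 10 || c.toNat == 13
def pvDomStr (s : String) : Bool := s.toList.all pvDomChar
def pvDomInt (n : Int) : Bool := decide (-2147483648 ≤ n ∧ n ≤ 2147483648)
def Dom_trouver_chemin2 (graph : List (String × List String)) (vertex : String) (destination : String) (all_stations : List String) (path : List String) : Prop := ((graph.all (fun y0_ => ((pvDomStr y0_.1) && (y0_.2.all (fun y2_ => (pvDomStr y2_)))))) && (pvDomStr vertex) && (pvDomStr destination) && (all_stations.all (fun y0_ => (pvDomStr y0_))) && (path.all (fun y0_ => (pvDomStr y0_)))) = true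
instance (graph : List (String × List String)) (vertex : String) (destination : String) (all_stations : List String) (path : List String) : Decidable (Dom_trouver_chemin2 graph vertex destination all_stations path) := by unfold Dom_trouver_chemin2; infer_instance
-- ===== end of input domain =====

-- B is a recursive DFS (call stack) instead of A's explicit-stack while loop; equal return
-- values; both mutate all_stations in Python the same way (ports thread it as a value).

-- ===== PORT A =====
-- A's while loop over the explicit stack; the stack is modeled with its TOP at the HEAD
-- (stack.pop() = take the head; the for-loop appending graph[vertex] puts those neighbours,
-- last one on top, i.e. reversed, in front of the rest). graph[v] on a missing key raises
-- KeyError in Python; on inputs inside Pre_ the lookup always succeeds and the `.getD []`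
-- default is never taken.
def runA (graph : List (String × List String)) (destination : String) :
    (stack : List String) → (path : List String) → (rem : List String) → Option (List String)
  | [], _, _ => none
  | v :: rest, path, rem =>
    if hv : v ∈ rem then
      have h1 : (rem.erase v).length < rem.length := by
        rw [List.length_erase_of_mem hv]
        have := List.length_pos_of_mem hv; omega
      if v = destination then some (path ++ [v])
      else runA graph destination (((graph.lookup v).getD []).reverse ++ rest) (path ++ [v]) (rem.erase v)
    else runA graph destination rest path rem
  termination_by stack _ rem => (rem.length, stack.length)
  decreasing_by
  · exact Prod.Lex.left _ _ h1
  · exact Prod.Lex.right _ (by simp)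

def trouver_chemin2 (graph : List (String × List String)) (vertex : String) (destination : String) (all_stations : List String) (path : List String) : Option (List String) :=
  runA graph destination [vertex] path all_stations

-- ===== PORT B =====
-- B's helper dfs(targets, path): try the vertices of `targets` in order, recursing into the
-- (reversed) neighbour list of a freshly visited vertex before its siblings. The remaining
-- stations are threaded as a value `rem`; the subtype only carries the length bound needed
-- for termination, the computed data is identical to Source B's. graph[v] is the same lookup
-- as in port A, succeeding on every input inside Pre_.
def dfsB (graph : List (String × List String)) (destination : String) :
    (targets : List String) → (path : List String) → (rem : List String) →
      Bool × List String × { r : List String // r.length ≤ rem.length }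
  | [], path, rem => (false, path, ⟨rem, le_rfl⟩)
  | v :: rest, path, rem =>
    if hv : v ∈ rem then
      have h1 : (rem.erase v).length < rem.length := by
        rw [List.length_erase_of_mem hv]
        have := List.length_pos_of_mem hv; omega
      if v = destination then (true, path ++ [v], ⟨rem.erase v, h1.le⟩)
      else
        match dfsB graph destination (((graph.lookup v).getD []).reverse) (path ++ [v]) (rem.erase v) with
        | (true, p1, r1) => (true, p1, ⟨r1.val, r1.property.trans h1.le⟩)
        | (false, p1, r1) =>
          match dfsB graph destination rest p1 r1.val with
          | (f2, p2, r2) => (f2, p2, ⟨r2.val, (r2.property.trans r1.property).trans h1.le⟩)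
    else
      match dfsB graph destination rest path rem with
      | (f2, p2, r2) => (f2, p2, r2)
  termination_by targets _ rem => (rem.length, targets.length)
  decreasing_by
  · exact Prod.Lex.left _ _ h1
  · exact Prod.Lex.left _ _ (Nat.lt_of_le_of_lt r1.property h1)
  · exact Prod.Lex.right _ (by simp)

def trouver_chemin2_alt (graph : List (String × List String)) (vertex : String) (destination : String) (all_stations : List String) (path : List String) : Option (List String) :=
  match dfsB graph destination [vertex] path all_stations with
  | (true, p, _) => some p
  | (false, _, _) => none

-- ===== PRECONDITION & SPEC =====
-- Pre_ excludes the malformed maps on which Python's graph[v] can raise KeyError in A and in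
-- B alike: it requires every station of all_stations that could ever be visited (the start
-- vertex, unless the search ends at it immediately, or a station listed in some adjacency
-- list) and is not the destination to have an adjacency entry in graph; being closed-form it
-- also excludes some maps whose keyless station happens never to be reached, where A returns
-- normally (cited in claim.json) and B behaves identically there too.
def Pre_trouver_chemin2 (graph : List (String × List String)) (vertex : String) (destination : String) (all_stations : List String) (path : List String) : Prop :=
  (vertex = destination ∧ vertex ∈ all_stations) ∨
  ∀ s ∈ all_stations, s = destination ∨ (s ≠ vertex ∧ ∀ p ∈ graph, s ∉ p.2) ∨ (graph.lookup s).isSome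
instance (graph : List (String × List String)) (vertex : String) (destination : String) (all_stations : List String) (path : List String) : Decidable (Pre_trouver_chemin2 graph vertex destination all_stations path) := by unfold Pre_trouver_chemin2; infer_instance

def pvWitness_trouver_chemin2 : (List (String × List String)) × String × String × List String × List String :=
  ([("a", ["b", "c"]), ("b", [])], "a", "c", ["a", "b", "c"], [])

def Spec_trouver_chemin2 (graph : List (String × List String)) (vertex : String) (destination : String) (all_stations : List String) (path : List String) (out : Option (List String)) : Prop := out = trouver_chemin2_alt graph vertex destination all_stations path
instance (graph : List (String × List String)) (vertex : String) (destination : String) (all_stations : List String) (path : List String) (out : Option (List String)) : Decidable (Spec_trouver_chemin2 graph vertex destination all_stations path out) := by unfold Spec_trouver_chemin2; infer_instance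

-- ===== CLAIM (what is proved, stated in full; the proofs are below) =====
def Claim_equal_trouver_chemin2 : Prop := ∀ (graph : List (String × List String)) (vertex : String) (destination : String) (all_stations : List String) (path : List String), Dom_trouver_chemin2 graph vertex destination all_stations path → Pre_trouver_chemin2 graph vertex destination all_stations path → Spec_trouver_chemin2 graph vertex destination all_stations path (trouver_chemin2 graph vertex destination all_stations path)

-- ===== LEMMAS AND PROOFS =====

-- The bridge: running A's stack loop on `vs ++ S` is B's dfs over `vs` followed, if nothing
-- was found, by the stack loop on `S` with the updated path and remaining stations.
theorem pv_bridge (graph : List (String × List String)) (destination : String) :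
    ∀ (n : Nat) (rem : List String), rem.length ≤ n →
    ∀ (vs S path : List String),
      runA graph destination (vs ++ S) path rem =
        (match dfsB graph destination vs path rem with
         | (true, p', _) => some p'
         | (false, p', r') => runA graph destination S p' r'.val) := by
  intro n
  induction n with
  | zero =>
    intro rem hrem vs
    have hrem0 : rem = [] := List.eq_nil_of_length_eq_zero (Nat.le_zero.mp hrem)
    subst hrem0
    induction vs with
    | nil => intro S path; simp [dfsB]
    | cons v rest ih =>
      intro S path
      rw [List.cons_append, runA, dfsB]
      simp only [List.not_mem_nil, dif_neg, not_false_iff]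
      exact ih S path
  | succ n ihn =>
    intro rem hrem vs
    induction vs with
    | nil => intro S path; simp [dfsB]
    | cons v rest ihvs =>
      intro S path
      rw [List.cons_append, runA, dfsB]
      by_cases hv : v ∈ rem
      · simp only [dif_pos hv]
        by_cases hd : v = destination
        · simp [hd]
        · simp only [if_neg hd]
          have hlt : (rem.erase v).length < rem.length := by
            rw [List.length_erase_of_mem hv]
            have := List.length_pos_of_mem hv; omega
          have h1 : (rem.erase v).length ≤ n := by omega
          rw [ihn (rem.erase v) h1 (((graph.lookup v).getD []).reverse) (rest ++ S) (path ++ [v])]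
          cases hc : dfsB graph destination (((graph.lookup v).getD []).reverse) (path ++ [v]) (rem.erase v) with
          | mk f rest1 =>
            cases rest1 with
            | mk p1 r1 =>
              cases f with
              | true => simp
              | false =>
                simp only
                have h2 : r1.val.length ≤ n := by
                  have := r1.property; omega
                rw [ihn r1.val h2 rest S p1]
                cases hc2 : dfsB graph destination rest p1 r1.val with
                | mk f2 rest2 =>
                  cases rest2 with
                  | mk p2 r2 => cases f2 <;> simp
      · simp only [dif_neg hv]
        exact ihvs S path

-- ===== VERDICT (by name: the statement is the Claim_ definition above) =====
theorem trouver_chemin2_spec : Claim_equal_trouver_chemin2 := by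
  intro graph vertex destination all_stations path _ _
  unfold Spec_trouver_chemin2 trouver_chemin2 trouver_chemin2_alt
  have h := pv_bridge graph destination all_stations.length all_stations le_rfl [vertex] [] path
  rw [List.append_nil] at h
  rw [h]
  cases hc : dfsB graph destination [vertex] path all_stations with
  | mk f rest1 =>
    cases rest1 with
    | mk p1 r1 =>
      cases f with
      | true => simp
      | false => simp [runA]
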